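/- GENERATED by c/gen_decode.py: decode facts of the image, one per distinct instruction byte string. -/
import UserX.DecodeImage

#decode_all Vorbis.Dec
  "0f28f2"  -- movaps xmm6,xmm2
  "0f848afcffff"  -- je 10ef70
  "0f8530ffffff"  -- jne 10d5f6
  "0f8c6effffff"  -- jl 10bdbe
  "0f92c0"  -- setb al
  "0fb6f0"  -- movzx esi,al
  "39e8"  -- cmp eax,ebp
  "410fb64d00"  -- movzx ecx,BYTE PTR [r13+0x0]
  "41803e0a"  -- cmp BYTE PTR [r14],0xa
  "41895e1c"  -- mov DWORD PTR [r14+0x1c],ebx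
  "418b8684000000"  -- mov eax,DWORD PTR [r14+0x84]
  "41c7871400c00000000000"  -- mov DWORD PTR [r15+0xc00014],0x0
  "440fb67301"  -- movzx r14d,BYTE PTR [rbx+0x1]
  "443b6504"  -- cmp r12d,DWORD PTR [rbp+0x4]
  "44897b04"  -- mov DWORD PTR [rbx+0x4],r15d
  "448b43b0"  -- mov r8d,DWORD PTR [rbx-0x50]
  "448bb574ffffff"  -- mov r14d,DWORD PTR [rbp-0x8c]
  "4584ff"  -- test r15b,r15b
  "458b6e0c"  -- mov r13d,DWORD PTR [r14+0xc]
  "48039d38080000"  -- add rbx,QWORD PTR [rbp+0x838]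
  "4863c3"  -- movsxd rax,ebx
  "4883c324"  -- add rbx,0x24
  "48894c2420"  -- mov QWORD PTR [rsp+0x20],rcx
  "4889fd"  -- mov rbp,rdi
  "488b7c2438"  -- mov rdi,QWORD PTR [rsp+0x38]
  "488d4310"  -- lea rax,[rbx+0x10]
  "488d7bd8"  -- lea rdi,[rbx-0x28]
  "488db3d4050000"  -- lea rsi,[rbx+0x5d4]
  "488dbcc568030000"  -- lea rdi,[rbp+rax*8+0x368]
  "48c1e602"  -- shl rsi,0x2
  "49034500"  -- add rax,QWORD PTR [r13+0x0]
  "4983c410"  -- add r12,0x10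
  "498d1c9c"  -- lea rbx,[r12+rbx*4]
  "498d7e28"  -- lea rdi,[r14+0x28]
  "49c7855001c00000000000"  -- mov QWORD PTR [r13+0xc00150],0x0
  "4b8d047f"  -- lea rax,[r15+r15*2]
  "4c63fb"  -- movsxd r15,ebx
  "4c8b2c24"  -- mov r13,QWORD PTR [rsp]
  "4c8d3440"  -- lea r14,[rax+rax*2]
  "4d63ec"  -- movsxd r13,r12d
  "4d8dbdb0000000"  -- lea r15,[r13+0xb0]
  "660f570547d50100"  -- xorpd xmm0,XMMWORD PTR [rip+0x1d547]
  "664183fd02"  -- cmp r13w,0x2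
  "7242"  -- jb 10025d
  "7457"  -- je 113394
  "7559"  -- jne 113b15
  "7c0a"  -- jl 10cd31
  "7e7c"  -- jle 111658
  "80fb02"  -- cmp bl,0x2
  "83c501"  -- add ebp,0x1
  "8944242c"  -- mov DWORD PTR [rsp+0x2c],eax
  "898d48ffffff"  -- mov DWORD PTR [rbp-0xb8],ecx
  "8b442418"  -- mov eax,DWORD PTR [rsp+0x18]
  "8b742478"  -- mov esi,DWORD PTR [rsp+0x78]
  "8d348504000000"  -- lea esi,[rax*4+0x4]
  "be03000000"  -- mov esi,0x3
  "c6842c4001000000"  -- mov BYTE PTR [rsp+rbp*1+0x140],0x0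
  "c783a000c000f3f3f3f3"  -- mov DWORD PTR [rbx+0xc000a0],0xf3f3f3f3
  "e8040fffff"  -- call 100640
  "e80d7effff"  -- call 10d1c0
  "e81852ffff"  -- call 100640
  "e8217effff"  -- call 100640
  "e82b1dffff"  -- call 104c60
  "e833a4ffff"  -- call 100640
  "e83f4affff"  -- call 100720
  "e848ddffff"  -- call 10d440
  "e85485ffff"  -- call 104d40
  "e8619ffeff"  -- call 100300
  "e86cc1ffff"  -- call 100300
  "e8786fffff"  -- call 10d1c0
  "e88355ffff"  -- call 100800
  "e88e6cffff"  -- call 100720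
  "e897c0ffff"  -- call 100560
  "e8a18effff"  -- call 100800
  "e8acc0feff"  -- call 100720
  "e8b5c1ffff"  -- call 100300
  "e8c015ffff"  -- call 100800
  "e8c9edfeff"  -- call 100300
  "e8d4befeff"  -- call 100640
  "e8df6cffff"  -- call 100720
  "e8e810ffff"  -- call 100480
  "e8efbeffff"  -- call 100640
  "e8fb20ffff"  -- call 100480
  "e927ffffff"  -- jmp 10fa53
  "e96cffffff"  -- jmp 1115c4
  "e9c8d6ffff"  -- jmp 113b22
  "eb1c"  -- jmp 111098
  "ebae"  -- jmp 10c94a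
  "f20f100d4a400100"  -- movsd xmm1,QWORD PTR [rip+0x1404a]
  "f20f59157bdc0100"  -- mulsd xmm2,QWORD PTR [rip+0x1dc7b]
  "f2480f2cc0"  -- cvttsd2si rax,xmm0
  "f30f105de8"  -- movss xmm3,DWORD PTR [rbp-0x18]
  "f30f113424"  -- movss DWORD PTR [rsp],xmm6
  "f30f115dbc"  -- movss DWORD PTR [rbp-0x44],xmm3
  "f30f5843e4"  -- addss xmm0,DWORD PTR [rbx-0x1c]
  "f30f594d04"  -- mulss xmm1,DWORD PTR [rbp+0x4]
  "f30f5ccb"  -- subss xmm1,xmm3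
  "f3410f110f"  -- movss DWORD PTR [r15],xmm1
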